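-- pv_equiv track=rewrite | github.com/hotosm/field-tm | src/backend/packages/area-splitter/area_splitter/splitter.py | _is_linear_split_feature
-- ===== SOURCE A (Python) =====
-- NON_TRAVERSABLE_BARRIER_VALUES = {
--     "fence",
--     "wire_fence",
--     "wall",
--     "city_wall",
--     "ditch",
-- }
--
-- NON_TRAVERSABLE_NATURAL_VALUES = {"cliff"}
--
-- NON_TRAVERSABLE_MAN_MADE_VALUES = {"embankment", "dyke", "dike"}
--
-- def _normalize_tag_value(value) -> set[str]:
--     """Normalize a tag value into a lowercase string set."""
--     if value is None:
--         return set()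
--     if isinstance(value, (list, tuple, set)):
--         return {str(item).strip().lower() for item in value if item}
--     return {str(value).strip().lower()}
--
-- def _is_linear_split_feature(tags: dict) -> bool:
--     """Return True when tags represent a linear feature used for splitting."""
--     if not isinstance(tags, dict) or not tags:
--         return False
--
--     if any(key in tags for key in ("highway", "waterway", "railway", "aeroway")):
--         return True
--
--     barrier_values = _normalize_tag_value(tags.get("barrier"))
--     if barrier_values & NON_TRAVERSABLE_BARRIER_VALUES:
--         return True
--
--     natural_values = _normalize_tag_value(tags.get("natural"))
--     if natural_values & NON_TRAVERSABLE_NATURAL_VALUES: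
--         return True
--
--     man_made_values = _normalize_tag_value(tags.get("man_made"))
--     if man_made_values & NON_TRAVERSABLE_MAN_MADE_VALUES:
--         return True
--
--     return False
-- ===== SOURCE B (Python) =====
-- NON_TRAVERSABLE_BARRIER_VALUES = {
--     "fence",
--     "wire_fence",
--     "wall",
--     "city_wall",
--     "ditch",
-- }
--
-- NON_TRAVERSABLE_NATURAL_VALUES = {"cliff"}
--
-- NON_TRAVERSABLE_MAN_MADE_VALUES = {"embankment", "dyke", "dike"}
--
--
-- def _normalize_tag_value(value):
--     """Normalize a tag value into a lowercase string set."""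
--     if value is None:
--         return set()
--     if isinstance(value, (list, tuple, set)):
--         return {str(item).strip().lower() for item in value if item}
--     return {str(value).strip().lower()}
--
--
-- # Keys whose mere presence marks a linear feature.
-- _PRESENCE_KEYS = frozenset({"highway", "waterway", "railway", "aeroway"})
--
-- # Keys whose (normalized) value must intersect the given set.
-- _VALUE_RULES = {
--     "barrier": NON_TRAVERSABLE_BARRIER_VALUES,
--     "natural": NON_TRAVERSABLE_NATURAL_VALUES,
--     "man_made": NON_TRAVERSABLE_MAN_MADE_VALUES,
-- }
--
--
-- def _entry_marks_linear(key, value):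
--     """Decide whether one (key, value) tag entry marks a linear feature."""
--     if key in _PRESENCE_KEYS:
--         return True
--     allowed = _VALUE_RULES.get(key)
--     if allowed is None:
--         return False
--     return bool(_normalize_tag_value(value) & allowed)
--
--
-- def _is_linear_split_feature(tags: dict) -> bool:
--     """Return True when tags represent a linear feature used for splitting."""
--     if not isinstance(tags, dict) or not tags:
--         return False
--     return any(_entry_marks_linear(k, v) for k, v in tags.items())
-- ===== Notes on version B (the rewrite author's own statement) =====
-- stated objective: simpler
-- what changed: Inverted the traversal: A issues seven fixed key lookups into the dict, B makes one pass over the dict's own entries and classifies each (key, value) entry against a presence-set/value-rule map, so the dict lookups disappear.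
import Mathlib
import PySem

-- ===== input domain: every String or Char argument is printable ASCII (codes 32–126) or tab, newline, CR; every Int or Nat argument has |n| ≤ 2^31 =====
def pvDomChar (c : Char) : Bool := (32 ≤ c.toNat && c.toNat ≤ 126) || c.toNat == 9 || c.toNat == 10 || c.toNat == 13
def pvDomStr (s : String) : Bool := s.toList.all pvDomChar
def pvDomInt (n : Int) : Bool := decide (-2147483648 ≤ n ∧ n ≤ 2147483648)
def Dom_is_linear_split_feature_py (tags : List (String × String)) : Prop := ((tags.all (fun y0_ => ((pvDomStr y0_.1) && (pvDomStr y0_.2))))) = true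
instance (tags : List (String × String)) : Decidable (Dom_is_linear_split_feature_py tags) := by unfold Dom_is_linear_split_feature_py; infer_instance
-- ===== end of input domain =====

-- B inverts A's traversal: one pass over the dict's entries classifying each, instead of seven key lookups (objective: simpler).

-- ===== PORT A =====
-- module constants (shared by both Pythons)
def NON_TRAVERSABLE_BARRIER_VALUES : PySem.Set String :=
  PySem.Set.ofList ["fence", "wire_fence", "wall", "city_wall", "ditch"]
def NON_TRAVERSABLE_NATURAL_VALUES : PySem.Set String :=
  PySem.Set.ofList ["cliff"]
def NON_TRAVERSABLE_MAN_MADE_VALUES : PySem.Set String :=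
  PySem.Set.ofList ["embankment", "dyke", "dike"]

-- shared module helper _normalize_tag_value, on the dict-of-strings domain:
-- value is Option String (None ↔ key absent)
def normalize_tag_value (value : Option String) : PySem.Set String :=
  match value with
  | none => PySem.Set.empty
  | some v => PySem.Set.ofList [PySem.Str.lower (PySem.Str.strip v)]

def is_linear_split_feature_py (tags : List (String × String)) : Bool :=
  if tags.isEmpty then false
  else if ["highway", "waterway", "railway", "aeroway"].any
            (fun key => (PySem.Dict.mk tags).contains key) then true
  else
    let barrier_values := normalize_tag_value ((PySem.Dict.mk tags).get? "barrier")
    if !(PySem.Set.inter barrier_values NON_TRAVERSABLE_BARRIER_VALUES).isEmpty then true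
    else
      let natural_values := normalize_tag_value ((PySem.Dict.mk tags).get? "natural")
      if !(PySem.Set.inter natural_values NON_TRAVERSABLE_NATURAL_VALUES).isEmpty then true
      else
        let man_made_values := normalize_tag_value ((PySem.Dict.mk tags).get? "man_made")
        if !(PySem.Set.inter man_made_values NON_TRAVERSABLE_MAN_MADE_VALUES).isEmpty then true
        else false

-- ===== PORT B =====
def PRESENCE_KEYS : PySem.Set String :=
  PySem.Set.ofList ["highway", "waterway", "railway", "aeroway"]

def VALUE_RULES : PySem.Dict String (PySem.Set String) :=
  PySem.Dict.mk
    [("barrier", NON_TRAVERSABLE_BARRIER_VALUES),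
     ("natural", NON_TRAVERSABLE_NATURAL_VALUES),
     ("man_made", NON_TRAVERSABLE_MAN_MADE_VALUES)]

def entry_marks_linear (key : String) (value : String) : Bool :=
  if PySem.Set.contains PRESENCE_KEYS key then true
  else
    match VALUE_RULES.get? key with
    | none => false
    | some allowed => !(PySem.Set.inter (normalize_tag_value (some value)) allowed).isEmpty

def is_linear_split_feature_py_alt (tags : List (String × String)) : Bool :=
  if tags.isEmpty then false
  else tags.any (fun kv => entry_marks_linear kv.1 kv.2)

-- ===== PRECONDITION & SPEC =====
-- Pre_ excludes association lists with duplicate keys: they correspond to no Python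
-- dict (a dict's keys are unique), so no input on which the Python A returns is excluded;
-- on such lists A's port reads only the first occurrence of a key while B scans all entries.
def Pre_is_linear_split_feature_py (tags : List (String × String)) : Prop :=
  (tags.map Prod.fst).Nodup
instance (tags : List (String × String)) : Decidable (Pre_is_linear_split_feature_py tags) := by
  unfold Pre_is_linear_split_feature_py; infer_instance

def pvWitness_is_linear_split_feature_py : (List (String × String)) :=
  [("highway", "residential"), ("name", "Main St")]

def Spec_is_linear_split_feature_py (tags : List (String × String)) (out : Bool) : Prop :=
  out = is_linear_split_feature_py_alt tags
instance (tags : List (String × String)) (out : Bool) :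
    Decidable (Spec_is_linear_split_feature_py tags out) := by
  unfold Spec_is_linear_split_feature_py; infer_instance

-- ===== CLAIM =====
def Claim_equal_is_linear_split_feature_py : Prop :=
  ∀ (tags : List (String × String)), Dom_is_linear_split_feature_py tags →
    Pre_is_linear_split_feature_py tags →
    Spec_is_linear_split_feature_py tags (is_linear_split_feature_py tags)

-- ===== LEMMAS AND PROOFS =====
-- A's value-key test, as a function of the first occurrence of the key.
def pvQ (S : PySem.Set String) (tags : List (String × String)) (k : String) : Bool :=
  !(PySem.Set.inter
      (normalize_tag_value (Option.map Prod.snd (tags.find? (fun p => p.1 == k)))) S).isEmpty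

theorem pvQ_nil (S : PySem.Set String) (k : String) : pvQ S [] k = false := by
  simp [pvQ, normalize_tag_value, PySem.Set.empty, PySem.Set.inter]

theorem pvQ_cons (S : PySem.Set String) (k v : String) (rest : List (String × String)) (x : String) :
    pvQ S ((k, v) :: rest) x =
      if k == x then !(PySem.Set.inter (normalize_tag_value (some v)) S).isEmpty
      else pvQ S rest x := by
  by_cases h : k = x
  · simp [pvQ, List.find?, h]
  · have hb : (k == x) = false := by simp [h]
    simp [pvQ, List.find?, hb]

theorem pvCont_cons (k v : String) (rest : List (String × String)) (x : String) :
    (PySem.Dict.mk ((k, v) :: rest)).contains x = ((k == x) || (PySem.Dict.mk rest).contains x) := by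
  simp [PySem.Dict.contains]

theorem pvQ_not_mem (S : PySem.Set String) (tags : List (String × String)) (k : String)
    (h : k ∉ tags.map Prod.fst) : pvQ S tags k = false := by
  have : tags.find? (fun p => p.1 == k) = none := by
    rw [List.find?_eq_none]
    intro p hp
    simp only [beq_iff_eq]
    intro hk
    exact h (List.mem_map.mpr ⟨p, hp, hk⟩)
  simp [pvQ, this, normalize_tag_value, PySem.Set.empty, PySem.Set.inter]

-- the core: with unique keys, B's single entry scan equals A's seven queries
theorem pv_scan_eq (tags : List (String × String))
    (h : (tags.map Prod.fst).Nodup) :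
    tags.any (fun kv => entry_marks_linear kv.1 kv.2) =
      ((PySem.Dict.mk tags).contains "highway" || (PySem.Dict.mk tags).contains "waterway" ||
       (PySem.Dict.mk tags).contains "railway" || (PySem.Dict.mk tags).contains "aeroway" ||
       pvQ NON_TRAVERSABLE_BARRIER_VALUES tags "barrier" ||
       pvQ NON_TRAVERSABLE_NATURAL_VALUES tags "natural" ||
       pvQ NON_TRAVERSABLE_MAN_MADE_VALUES tags "man_made") := by
  induction tags with
  | nil => simp [PySem.Dict.contains, pvQ_nil]
  | cons kv rest ih =>
    obtain ⟨k, v⟩ := kv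
    simp only [List.map_cons, List.nodup_cons] at h
    obtain ⟨hk, hrest⟩ := h
    rw [List.any_cons, ih hrest]
    rw [pvCont_cons, pvCont_cons, pvCont_cons, pvCont_cons, pvQ_cons, pvQ_cons, pvQ_cons]
    by_cases h1 : k = "highway"
    · subst h1; simp [entry_marks_linear, PRESENCE_KEYS, PySem.Set.ofList, PySem.Set.contains,
        PySem.Set.add]
    · by_cases h2 : k = "waterway"
      · subst h2; simp [entry_marks_linear, PRESENCE_KEYS, PySem.Set.ofList, PySem.Set.contains,
          PySem.Set.add]
      · by_cases h3 : k = "railway"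
        · subst h3; simp [entry_marks_linear, PRESENCE_KEYS, PySem.Set.ofList, PySem.Set.contains,
            PySem.Set.add]
        · by_cases h4 : k = "aeroway"
          · subst h4; simp [entry_marks_linear, PRESENCE_KEYS, PySem.Set.ofList, PySem.Set.contains,
              PySem.Set.add]
          · by_cases h5 : k = "barrier"
            · subst h5
              rw [pvQ_not_mem _ rest "barrier" hk]
              simp [entry_marks_linear, PRESENCE_KEYS, VALUE_RULES, PySem.Set.ofList,
                PySem.Set.contains, PySem.Set.add, PySem.Dict.get?]
              cases hb : !(PySem.Set.inter (normalize_tag_value (some v))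
                  NON_TRAVERSABLE_BARRIER_VALUES).isEmpty <;> simp
            · by_cases h6 : k = "natural"
              · subst h6
                rw [pvQ_not_mem _ rest "natural" hk]
                simp [entry_marks_linear, PRESENCE_KEYS, VALUE_RULES, PySem.Set.ofList,
                  PySem.Set.contains, PySem.Set.add, PySem.Dict.get?, List.find?]
                cases hb : !(PySem.Set.inter (normalize_tag_value (some v))
                    NON_TRAVERSABLE_NATURAL_VALUES).isEmpty <;> simp
              · by_cases h7 : k = "man_made"
                · subst h7
                  rw [pvQ_not_mem _ rest "man_made" hk]
                  simp [entry_marks_linear, PRESENCE_KEYS, VALUE_RULES, PySem.Set.ofList,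
                    PySem.Set.contains, PySem.Set.add, PySem.Dict.get?, List.find?]
                  cases hb : !(PySem.Set.inter (normalize_tag_value (some v))
                      NON_TRAVERSABLE_MAN_MADE_VALUES).isEmpty <;> simp
                · have e1 : (k == "highway") = false := by simp [h1]
                  have e2 : (k == "waterway") = false := by simp [h2]
                  have e3 : (k == "railway") = false := by simp [h3]
                  have e4 : (k == "aeroway") = false := by simp [h4]
                  have e5 : ("barrier" == k) = false := by simp [Ne.symm h5]
                  have e6 : ("natural" == k) = false := by simp [Ne.symm h6]
                  have e7 : ("man_made" == k) = false := by simp [Ne.symm h7]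
                  simp [entry_marks_linear, PRESENCE_KEYS, VALUE_RULES, PySem.Set.ofList,
                    PySem.Set.contains, PySem.Set.add, PySem.Dict.get?, List.find?,
                    h1, h2, h3, h4, h5, h6, h7, e1, e2, e3, e4, e5, e6, e7]

-- A's guard chain over seven boolean atoms equals their disjunction.
theorem pv_chain_eq_or (b1 b2 b3 b4 b5 b6 b7 : Bool) :
    (if b1 || (b2 || (b3 || (b4 || false))) then true
     else if b5 then true else if b6 then true else if b7 then true else false)
      = (b1 || b2 || b3 || b4 || b5 || b6 || b7) := by
  cases b1 <;> cases b2 <;> cases b3 <;> cases b4 <;> cases b5 <;> cases b6 <;> cases b7 <;> rfl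

-- ===== VERDICT =====
theorem is_linear_split_feature_py_spec : Claim_equal_is_linear_split_feature_py := by
  intro tags _ hpre
  unfold Spec_is_linear_split_feature_py is_linear_split_feature_py is_linear_split_feature_py_alt
  by_cases h : tags.isEmpty
  · simp [h]
  · simp only [h, Bool.false_eq_true, if_false, List.any_cons, List.any_nil]
    rw [pv_scan_eq tags hpre]
    exact pv_chain_eq_or _ _ _ _ _ _ _
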